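-- pv_equiv track=rewrite | github.com/Martin-Paez/Python | Proyecto 5 - GoogleSheet Apps/src/imports/lector.py | sig_palabra
-- ===== SOURCE A (Python) =====
-- def no_es_separador(string):
-- 	ok = string!=" " and string!="="
-- 	ok = ok and string!="<" and string!=">"
-- 	return ok
--
-- def contiene_varias_palabras(string):
-- 	ok=False
-- 	if((" " in string) or ("=" in string)):
-- 		ok = True
-- 	elif((">" in string)or ("<" in string)): #para hacerlo mas corto
-- 		ok = True
-- 	return ok
--
-- def sig_palabra(string):
-- 	resto=""
-- 	palabra = string
-- 	if(len(string)>0):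
-- 		c=espacios_al_comienzo(string)
-- 		if(c==len(string)): #Solo enviaron espacios
-- 			palabra = ""
-- 		else:
-- 			d=c
-- 			if(string[d] in "= > <"):
-- 				palabra=string[d]
-- 				resto = string[d+1:]
-- 			elif(contiene_varias_palabras(string[d:])):
-- 				while(no_es_separador(string[d])):
-- 					d = d+1
-- 				palabra = string[c:d]
-- 				resto=string[d:]
-- 			else: #Ultima palabra
-- 				palabra = string[c:]
-- 	return [palabra,resto]
--
-- def espacios_al_comienzo(string):
-- 	c = 0
-- 	while(c<len(string) and string[c]==" "):
-- 		c=c+1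
-- 	return c
-- ===== SOURCE B (Python) =====
-- def sig_palabra(string):
--     word = string.lstrip(' ')
--     if not word:
--         return ['', '']
--     if word[0] in '=<>':
--         return [word[0], word[1:]]
--     cuts = [p for p in (word.find(sep) for sep in ' =<>') if p >= 0]
--     p = min(cuts) if cuts else len(word)
--     return [word[:p], word[p:]]
-- ===== Notes on version B (the rewrite author's own statement) =====
-- stated objective: alternative
-- what changed: B replaces A's per-character while loops and separate contiene_varias_palabras containment pre-scan by one str.find per separator character plus a min over the hits, so no explicit character loop remains.
import Mathlib
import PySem

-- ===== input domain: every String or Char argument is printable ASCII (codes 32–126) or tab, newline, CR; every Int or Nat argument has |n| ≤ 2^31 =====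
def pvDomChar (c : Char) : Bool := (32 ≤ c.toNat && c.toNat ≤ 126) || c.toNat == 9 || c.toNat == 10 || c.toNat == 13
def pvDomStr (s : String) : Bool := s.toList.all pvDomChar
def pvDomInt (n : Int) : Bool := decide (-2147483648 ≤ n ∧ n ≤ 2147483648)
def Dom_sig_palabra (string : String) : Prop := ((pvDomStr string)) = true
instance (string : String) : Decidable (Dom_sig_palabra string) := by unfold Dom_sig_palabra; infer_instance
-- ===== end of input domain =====

-- B replaces A's per-character while loops and containment pre-scan by one library
-- search per separator (str.find) and a min over the hits; objective: alternative.

-- ===== PORT A =====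

-- no_es_separador, applied by A only to one-character strings string[d]
def noEsSeparador (ch : Char) : Bool :=
  ((ch ≠ ' ' && ch ≠ '=') && ch ≠ '<') && ch ≠ '>'

-- contiene_varias_palabras ('"x" in s' for a 1-char x = character membership)
def contieneVariasPalabras (cs : List Char) : Bool :=
  if cs.contains ' ' || cs.contains '=' then true
  else if cs.contains '>' || cs.contains '<' then true
  else false

-- espacios_al_comienzo: the while loop as the obvious structural recursion
def espaciosAlComienzo : List Char → Nat
  | [] => 0
  | ch :: rest => if ch = ' ' then espaciosAlComienzo rest + 1 else 0

-- the inner 'while no_es_separador(string[d]): d += 1' loop of A: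
-- the index d walks forward, i.e. the loop consumes the suffix string[d:]
def scanA (d : Nat) : List Char → Nat
  | [] => d
  | ch :: rest => if noEsSeparador ch then scanA (d + 1) rest else d

def sig_palabra (string : String) : List String :=
  let cs := string.toList
  if cs.length > 0 then
    let c := espaciosAlComienzo cs
    if c = cs.length then [String.mk [], String.mk []]  -- solo enviaron espacios
    else
      let d := c
      if ("= > <".toList).contains (cs.getD d ' ') then
        [String.mk [cs.getD d ' '], String.mk (cs.drop (d + 1))]
      else if contieneVariasPalabras (cs.drop d) then
        let d' := scanA d (cs.drop d)
        [String.mk ((cs.drop c).take (d' - c)), String.mk (cs.drop d')]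
      else [String.mk (cs.drop c), String.mk []]
  else [string, String.mk []]

-- ===== PORT B =====

-- hand port of string.lstrip(' ') — exact: drops LEADING ' ' characters only
def dropSpaces : List Char → List Char
  | [] => []
  | ch :: rest => if ch = ' ' then dropSpaces rest else ch :: rest

def sig_palabra_alt (string : String) : List String :=
  let w := dropSpaces string.toList
  if w = [] then [String.mk [], String.mk []]
  else if ['=', '<', '>'].contains (w.headD ' ') then   -- word[0] in '=<>'
    [String.mk [w.headD ' '], String.mk w.tail]
  else
    -- cuts = [p for p in (word.find(sep) for sep in ' =<>') if p >= 0]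
    let cuts := ([' ', '=', '<', '>'].map (fun c => PySem.Chars.find w [c])).filter
                  (fun p => decide (0 ≤ p))
    -- p = min(cuts) if cuts else len(word)
    let p : Int := match PySem.List.min? cuts (fun x => x) with
      | some m => m
      | none => (w.length : Int)
    [String.mk (PySem.List.slice w none (some p)), String.mk (PySem.List.slice w (some p) none)]

-- ===== PRECONDITION & SPEC =====
def Spec_sig_palabra (string : String) (out : List String) : Prop := out = sig_palabra_alt string
instance (string : String) (out : List String) : Decidable (Spec_sig_palabra string out) := by unfold Spec_sig_palabra; infer_instance

-- ===== CLAIM =====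
def Claim_equal_sig_palabra : Prop := ∀ (string : String), Dom_sig_palabra string → Spec_sig_palabra string (sig_palabra string)

-- ===== LEMMAS AND PROOFS =====

def isSep (c : Char) : Bool := c = ' ' || c = '=' || c = '<' || c = '>'

-- index of the first separator (proof-side normal form both ports are reduced to)
def firstSep : List Char → Nat
  | [] => 0
  | ch :: rest => if isSep ch then 0 else firstSep rest + 1

-- common normal form of the split
def refSplit (string : String) : List String :=
  let t := dropSpaces string.toList
  if t = [] then [String.mk [], String.mk []]
  else
    let ch := t.headD ' '
    if ch = '=' || ch = '<' || ch = '>' then [String.mk [ch], String.mk t.tail]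
    else
      let p := firstSep t
      [String.mk (t.take p), String.mk (t.drop p)]

theorem espacios_le (cs : List Char) : espaciosAlComienzo cs ≤ cs.length := by
  induction cs with
  | nil => simp [espaciosAlComienzo]
  | cons ch rest ih =>
    simp only [espaciosAlComienzo, List.length_cons]
    split <;> omega

theorem dropSpaces_eq (cs : List Char) :
    dropSpaces cs = cs.drop (espaciosAlComienzo cs) := by
  induction cs with
  | nil => simp [dropSpaces, espaciosAlComienzo]
  | cons ch rest ih =>
    simp only [dropSpaces, espaciosAlComienzo]
    split <;> simp [ih]

theorem head_drop_ne_space (cs : List Char) (ch : Char) (rest : List Char)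
    (h : cs.drop (espaciosAlComienzo cs) = ch :: rest) : ch ≠ ' ' := by
  induction cs with
  | nil => simp [espaciosAlComienzo] at h
  | cons c t ih =>
    by_cases hc : c = ' '
    · simp [espaciosAlComienzo, hc] at h
      exact ih h
    · simp [espaciosAlComienzo, hc] at h
      exact h.1 ▸ hc

theorem scanA_eq (t : List Char) (d : Nat) :
    scanA d t = d + firstSep t := by
  induction t generalizing d with
  | nil => simp [scanA, firstSep]
  | cons ch rest ih =>
    simp only [scanA, firstSep, noEsSeparador, isSep]
    by_cases h1 : ch = ' ' <;> by_cases h2 : ch = '=' <;>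
      by_cases h3 : ch = '<' <;> by_cases h4 : ch = '>' <;>
      simp [h1, h2, h3, h4, ih] <;> omega

theorem firstSep_of_no_sep (t : List Char) (h : contieneVariasPalabras t = false) :
    firstSep t = t.length := by
  induction t with
  | nil => simp [firstSep]
  | cons ch rest ih =>
    simp only [contieneVariasPalabras] at h ih
    simp only [List.contains_cons] at h
    by_cases h1 : ch = ' ' ∨ ch = '=' ∨ ch = '>' ∨ ch = '<'
    · exfalso
      rcases h1 with h1 | h1 | h1 | h1 <;> simp [h1] at h
    · push_neg at h1
      obtain ⟨n1, n2, n3, n4⟩ := h1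
      simp only [firstSep, isSep]
      rw [if_neg (by simp [n1, n2, n3, n4])]
      have : firstSep rest = rest.length := by
        apply ih
        split at h
        · exact absurd h (by simp)
        · split at h
          · exact absurd h (by simp)
          · rename_i hA hB
            simp [n1, n2, n3, n4] at hA hB
            split
            · rename_i hx; exact absurd hx (by simp [hA.1, hA.2])
            · split
              · rename_i hx; exact absurd hx (by simp [hB.1, hB.2])
              · rfl
      simp [this]

theorem firstSep_le (t : List Char) : firstSep t ≤ t.length := by
  induction t with
  | nil => simp [firstSep]
  | cons ch rest ih =>
    simp only [firstSep, List.length_cons]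
    split <;> omega

theorem firstSep_before (t : List Char) (i : Nat) (c : Char)
    (hi : i < firstSep t) (hc : t[i]? = some c) : isSep c = false := by
  induction t generalizing i with
  | nil => simp [firstSep] at hi
  | cons ch rest ih =>
    simp only [firstSep] at hi
    by_cases hs : isSep ch
    · simp [hs] at hi
    · rw [if_neg hs] at hi
      cases i with
      | zero =>
        simp at hc
        simpa [← hc] using (Bool.eq_false_iff.mpr hs)
      | succ j =>
        simp only [List.getElem?_cons_succ] at hc
        exact ih j (by omega) hc

theorem firstSep_at (t : List Char) (h : firstSep t < t.length) :
    ∃ c, t[firstSep t]? = some c ∧ isSep c = true := by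
  induction t with
  | nil => simp at h
  | cons ch rest ih =>
    simp only [firstSep] at h ⊢
    by_cases hs : isSep ch
    · exact ⟨ch, by simp [hs], hs⟩
    · rw [if_neg hs] at h ⊢
      obtain ⟨c, hc, hcs⟩ := ih (by simpa using Nat.lt_of_succ_lt_succ h)
      exact ⟨c, by simpa using hc, hcs⟩

-- [c] <+: l ↔ the first element of l is c
theorem singleton_prefix_iff (c : Char) (l : List Char) :
    [c] <+: l ↔ l[0]? = some c := by
  cases l with
  | nil => simp
  | cons a t => simp [List.cons_prefix_cons, eq_comm]

theorem singleton_prefix_drop_iff (c : Char) (w : List Char) (j : Nat) :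
    [c] <+: w.drop j ↔ w[j]? = some c := by
  rw [singleton_prefix_iff]
  simp [List.getElem?_drop]

-- characterisation of word.find(sep) for a 1-char sep against firstSep
theorem find_singleton_cases (w : List Char) (c : Char) (hc : isSep c = true) :
    PySem.Chars.find w [c] = -1 ∨
    (0 ≤ PySem.Chars.find w [c] ∧ (firstSep w : Int) ≤ PySem.Chars.find w [c]) := by
  by_cases h : PySem.Chars.find w [c] = -1
  · exact Or.inl h
  · right
    have hpos : 0 ≤ PySem.Chars.find w [c] := by
      have := PySem.Chars.neg_one_le_find (s := w) (sub := [c])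
      omega
    refine ⟨hpos, ?_⟩
    obtain ⟨hpre, _⟩ := PySem.Chars.find_spec (s := w) (sub := [c]) hpos
    rw [singleton_prefix_drop_iff] at hpre
    by_contra hlt
    push_neg at hlt
    have hj : (PySem.Chars.find w [c]).toNat < firstSep w := by omega
    have := firstSep_before w (PySem.Chars.find w [c]).toNat c hj hpre
    simp [hc] at this

theorem find_at_firstSep (w : List Char) (c : Char) (hc : isSep c = true)
    (hat : w[firstSep w]? = some c) :
    PySem.Chars.find w [c] = (firstSep w : Int) := by
  have hinf : [c] <:+: w := by
    have h1 : [c] <+: w.drop (firstSep w) := (singleton_prefix_drop_iff c w _).mpr hat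
    exact h1.isInfix.trans (List.drop_suffix _ _).isInfix
  have hpos : 0 ≤ PySem.Chars.find w [c] := (PySem.Chars.find_nonneg_iff w [c]).mpr hinf
  obtain ⟨hpre, hmin⟩ := PySem.Chars.find_spec (s := w) (sub := [c]) hpos
  have hle : (PySem.Chars.find w [c]).toNat ≤ firstSep w := by
    by_contra hgt
    push_neg at hgt
    exact hmin (firstSep w) hgt ((singleton_prefix_drop_iff c w _).mpr hat)
  rw [singleton_prefix_drop_iff] at hpre
  have hge : firstSep w ≤ (PySem.Chars.find w [c]).toNat := by
    by_contra hlt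
    push_neg at hlt
    have := firstSep_before w (PySem.Chars.find w [c]).toNat c hlt hpre
    simp [hc] at this
  omega

theorem find_none_of_full (w : List Char) (c : Char) (hc : isSep c = true)
    (hfull : firstSep w = w.length) : PySem.Chars.find w [c] = -1 := by
  rw [PySem.Chars.find_eq_neg_one_iff]
  intro hinf
  have hin : PySem.Chars.isIn [c] w = true := (PySem.Chars.isIn_iff_infix [c] w).mpr hinf
  obtain ⟨j, hj⟩ := (PySem.Chars.exists_prefix_drop_iff_isIn [c] w).mpr hin
  rw [singleton_prefix_drop_iff] at hj
  have hjlt : j < w.length := (List.getElem?_eq_some_iff.mp hj).1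
  have := firstSep_before w j c (by omega) hj
  simp [hc] at this

-- main lemma: B's min-of-finds computes firstSep
theorem cuts_min_eq (w : List Char) :
    (match PySem.List.min? ((([' ', '=', '<', '>'].map (fun c => PySem.Chars.find w [c])).filter
        (fun p => decide (0 ≤ p)))) (fun x => x) with
      | some m => m
      | none => (w.length : Int)) = (firstSep w : Int) := by
  by_cases hfull : firstSep w = w.length
  · have e1 := find_none_of_full w ' ' (by decide) hfull
    have e2 := find_none_of_full w '=' (by decide) hfull
    have e3 := find_none_of_full w '<' (by decide) hfull
    have e4 := find_none_of_full w '>' (by decide) hfull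
    have hmn : PySem.List.min? ([] : List Int) (fun x => x) = none := by
      rw [PySem.List.min?_eq_none_iff]
    simp [e1, e2, e3, e4, hfull, hmn]
  · have hlt : firstSep w < w.length := lt_of_le_of_ne (firstSep_le w) hfull
    obtain ⟨c0, hat, hc0⟩ := firstSep_at w hlt
    have hfind0 : PySem.Chars.find w [c0] = (firstSep w : Int) :=
      find_at_firstSep w c0 hc0 hat
    have hc0mem : c0 ∈ ([' ', '=', '<', '>'] : List Char) := by
      simp only [isSep, Bool.or_eq_true, decide_eq_true_eq] at hc0
      rcases hc0 with ((h | h) | h) | h <;> simp [h]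
    have hkmem : (firstSep w : Int) ∈
        (([' ', '=', '<', '>'].map (fun c => PySem.Chars.find w [c])).filter
          (fun p => decide (0 ≤ p))) := by
      rw [List.mem_filter]
      constructor
      · exact List.mem_map.mpr ⟨c0, hc0mem, hfind0⟩
      · simp
    cases hmin : PySem.List.min? ((([' ', '=', '<', '>'].map
        (fun c => PySem.Chars.find w [c])).filter (fun p => decide (0 ≤ p)))) (fun x => x) with
    | none =>
      rw [PySem.List.min?_eq_none_iff] at hmin
      rw [hmin] at hkmem
      simp at hkmem
    | some m =>
      have hm_mem := PySem.List.min?_mem hmin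
      have hmle : m ≤ (firstSep w : Int) := PySem.List.min?_isMin hmin _ hkmem
      rw [List.mem_filter] at hm_mem
      obtain ⟨hm_map, hm0⟩ := hm_mem
      obtain ⟨c, hcmem, hfc⟩ := List.mem_map.mp hm_map
      have hcsep : isSep c = true := by
        simp at hcmem
        rcases hcmem with h | h | h | h <;> simp [isSep, h]
      have hge : (firstSep w : Int) ≤ m := by
        rcases find_singleton_cases w c hcsep with h | ⟨_, h⟩
        · rw [hfc] at h; simp [h] at hm0
        · omega
      simp only []
      omega

theorem alt_eq_ref (s : String) : sig_palabra_alt s = refSplit s := by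
  unfold sig_palabra_alt refSplit
  by_cases hnil : dropSpaces s.toList = []
  · simp [hnil]
  · rw [if_neg hnil, if_neg hnil]
    set t := dropSpaces s.toList with ht
    set ch := t.headD ' ' with hch
    by_cases hsep : ch = '=' ∨ ch = '<' ∨ ch = '>'
    · have hm : (['=', '<', '>'] : List Char).contains ch = true := by
        rcases hsep with h | h | h <;> simp [h]
      rw [if_pos hm, if_pos (by rcases hsep with h | h | h <;> simp [h])]
    · push_neg at hsep
      obtain ⟨n1, n2, n3⟩ := hsep
      have hm : (['=', '<', '>'] : List Char).contains ch = false := by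
        simp [n1, n2, n3]
      rw [hm]
      simp only [Bool.false_eq_true, if_false]
      rw [if_neg (by simp [n1, n2, n3])]
      have hp := cuts_min_eq t
      rw [hp, PySem.List.slice_to_natCast, PySem.List.slice_from_natCast]

theorem a_eq_ref (s : String) : sig_palabra s = refSplit s := by
  by_cases hnil : s.toList = []
  · have hs0 : s = "" := by simp_all
    subst hs0
    simp [sig_palabra, refSplit, dropSpaces]
    rfl
  · simp only [sig_palabra, refSplit]
    set cs : List Char := s.toList with hcs
    have hlen : cs.length > 0 := by
      cases h : cs with
      | nil => exact absurd h hnil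
      | cons a t => simp
    simp only [if_pos hlen]
    set e := espaciosAlComienzo cs with he
    rw [dropSpaces_eq]
    rw [← he]
    by_cases hfull : e = cs.length
    · rw [if_pos hfull]
      rw [List.drop_eq_nil_of_le (le_of_eq hfull.symm)]
      rw [if_pos rfl]
    · rw [if_neg hfull]
      have helt : e < cs.length := lt_of_le_of_ne (espacios_le cs) hfull
      rw [List.drop_eq_getElem_cons helt]
      rw [if_neg (List.cons_ne_nil _ _)]
      simp only [List.headD_cons, List.tail_cons]
      have hget : cs.getD e ' ' = cs[e] := by
        simp [List.getD_eq_getElem?_getD, List.getElem?_eq_getElem helt]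
      have hne : cs[e] ≠ ' ' :=
        head_drop_ne_space cs cs[e] (cs.drop (e + 1))
          (by rw [← he, List.drop_eq_getElem_cons helt])
      by_cases hsep : cs[e] = '=' ∨ cs[e] = '<' ∨ cs[e] = '>'
      · have hm : (("= > <".toList).contains (cs.getD e ' ')) = true := by
          rw [hget]
          rcases hsep with h | h | h <;> simp [h]
        rw [if_pos hm, hget]
        rw [if_pos (by rcases hsep with h | h | h <;> simp [h])]
      · push_neg at hsep
        obtain ⟨n1, n2, n3⟩ := hsep
        have hm : (("= > <".toList).contains (cs.getD e ' ')) = false := by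
          rw [hget]
          simp only [List.contains_eq_mem]
          have : "= > <".toList = ['=', ' ', '>', ' ', '<'] := by decide
          rw [this]
          simp [n1, n2, n3, hne]
        rw [hm]
        simp only [Bool.false_eq_true, if_false]
        have hsp : scanA e (cs.drop e) = e + firstSep (cs.drop e) := scanA_eq (cs.drop e) e
        have hdropeq : cs[e] :: cs.drop (e + 1) = cs.drop e :=
          (List.drop_eq_getElem_cons helt).symm
        split_ifs with hcv hdec hdec
        · simp [n1, n2, n3] at hdec
        · rw [hdropeq, hsp]
          have h1 : e + firstSep (cs.drop e) - e = firstSep (cs.drop e) := by omega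
          rw [h1, ← List.drop_drop]
        · simp [n1, n2, n3] at hdec
        · simp only [Bool.not_eq_true] at hcv
          have hfs : firstSep (cs.drop e) = (cs.drop e).length :=
            firstSep_of_no_sep _ (hdropeq ▸ hcv)
          rw [hdropeq, hfs, List.take_length, List.length_drop]
          have hz : (cs.drop e).drop (cs.length - e) = [] := by
            apply List.drop_eq_nil_of_le
            simp [List.length_drop]
          rw [hz]

-- ===== VERDICT =====
theorem sig_palabra_spec : Claim_equal_sig_palabra := by
  intro s _
  unfold Spec_sig_palabra
  rw [a_eq_ref, alt_eq_ref]
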